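-- pv_equiv track=rewrite | github.com/loftusa/attribution | experiments/01_explore_solution_results.py | vowels_count_alex
-- ===== SOURCE A (Python) =====
-- def vowels_count_alex(s):
--   """Write a function vowels_count which takes a string representing
--   a word as input and returns the number of vowels in the string.
--   Vowels in this case are 'a', 'e', 'i', 'o', 'u'. Here, 'y' is also a
--   vowel, but only when it is at the end of the given word.
--
--   Example:
--   >>> vowels_count("abcde")
--   2
--   >>> vowels_count("ACEDY")
--   3
--   """
--   from collections import Counter
--   vowels = list("aeiou")
--   s = s.lower()
--   if s.endswith("y"):
--     vowels += "y"
--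
--   c = Counter(s)
--   return sum([c[val] for val in vowels])
-- ===== SOURCE B (Python) =====
-- def vowels_count_alex(s):
--     t = s.lower()
--     vowels = "aeiouy" if t.endswith("y") else "aeiou"
--     return sum(ch in vowels for ch in t)
-- ===== Notes on version B (the rewrite author's own statement) =====
-- stated objective: simpler
-- what changed: Replaces A's Counter histogram plus a sum over selected keys by a single membership scan of the lowered string, with the vowel set chosen once up front ('aeiouy' when the word ends in y, matching A's behaviour of adding every y).
import Mathlib
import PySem

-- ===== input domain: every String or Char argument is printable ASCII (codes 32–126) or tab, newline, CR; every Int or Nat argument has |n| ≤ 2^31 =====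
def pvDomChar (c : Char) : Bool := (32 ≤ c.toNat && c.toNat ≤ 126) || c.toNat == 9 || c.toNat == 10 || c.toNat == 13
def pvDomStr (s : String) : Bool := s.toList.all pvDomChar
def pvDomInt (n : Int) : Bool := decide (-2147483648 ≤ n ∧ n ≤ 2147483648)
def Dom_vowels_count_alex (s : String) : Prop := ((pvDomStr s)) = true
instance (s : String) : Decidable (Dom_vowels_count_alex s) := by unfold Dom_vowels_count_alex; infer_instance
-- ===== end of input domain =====

-- B replaces A's Counter histogram + sum over selected keys by one membership scan
-- of the lowered string (objective: simpler; same behaviour, incl. a trailing y adding every y).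

-- ===== PORT A =====
-- vowels = list("aeiou"); s = s.lower(); if s.endswith("y"): vowels += "y";
-- c = Counter(s); return sum([c[val] for val in vowels])
def vowels_count_alex (s : String) : Int :=
  ((if PySem.Str.endswith (PySem.Str.lower s) "y" then ['a','e','i','o','u'] ++ ['y']
    else ['a','e','i','o','u']).map
      (fun v => (PySem.Dict.counter (PySem.Str.lower s).toList).getD v 0)).sum

-- ===== PORT B =====
-- t = s.lower(); vowels = "aeiouy" if t.endswith("y") else "aeiou";
-- return sum(ch in vowels for ch in t)
def vowels_count_alex_alt (s : String) : Int :=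
  ((PySem.Str.lower s).toList.map
    (fun ch =>
      if ch ∈ (if PySem.Str.endswith (PySem.Str.lower s) "y" then "aeiouy".toList else "aeiou".toList)
      then (1 : Int) else 0)).sum

-- ===== PRECONDITION & SPEC =====
def Spec_vowels_count_alex (s : String) (out : Int) : Prop := out = vowels_count_alex_alt s
instance (s : String) (out : Int) : Decidable (Spec_vowels_count_alex s out) := by unfold Spec_vowels_count_alex; infer_instance

-- ===== CLAIM (what is proved, stated in full; the proofs are below) =====
def Claim_equal_vowels_count_alex : Prop := ∀ (s : String), Dom_vowels_count_alex s → Spec_vowels_count_alex s (vowels_count_alex s)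

-- ===== LEMMAS AND PROOFS =====

-- sum over a nodup list V of the indicator (v = c) is the indicator (c ∈ V)
theorem pv_sum_indicator (c : Char) (V : List Char) (h : V.Nodup) :
    (V.map (fun v => if v = c then (1 : Int) else 0)).sum = if c ∈ V then 1 else 0 := by
  induction V with
  | nil => simp
  | cons v V ih =>
    rcases List.nodup_cons.mp h with ⟨hv, hV⟩
    by_cases hc : v = c
    · subst hc
      simp [ih hV, hv]
    · have hc' : c ≠ v := fun e => hc e.symm
      simp [ih hV, List.mem_cons, hc', hc]

-- sum of per-vowel counts = membership scan, for a nodup vowel list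
theorem pv_sum_count (V : List Char) (h : V.Nodup) (t : List Char) :
    (V.map (fun v => (t.count v : Int))).sum
      = (t.map (fun ch => if ch ∈ V then (1 : Int) else 0)).sum := by
  induction t with
  | nil => simp
  | cons c t ih =>
    have step : (V.map (fun v => ((c :: t).count v : Int))).sum
        = (V.map (fun v => (t.count v : Int))).sum
          + (V.map (fun v => if v = c then (1 : Int) else 0)).sum := by
      rw [← PySem.List.sum_map_add_int]
      refine congrArg List.sum (List.map_congr_left fun v _ => ?_)
      by_cases hvc : v = c
      · subst hvc; simp
      · simp [hvc, Ne.symm hvc]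
    rw [step, ih, pv_sum_indicator c V h]
    simp [add_comm]

-- ===== VERDICT (by name: the statement is the Claim_ definition above) =====
theorem vowels_count_alex_spec : Claim_equal_vowels_count_alex := by
  intro s _
  unfold Spec_vowels_count_alex vowels_count_alex vowels_count_alex_alt
  by_cases hy : PySem.Str.endswith (PySem.Str.lower s) "y" = true
  · rw [if_pos hy, if_pos hy]
    simp only [PySem.Dict.getD_counter, List.cons_append, List.nil_append,
      show "aeiouy".toList = ['a','e','i','o','u','y'] from rfl]
    exact pv_sum_count ['a','e','i','o','u','y'] (by decide) (PySem.Str.lower s).toList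
  · rw [if_neg hy, if_neg hy]
    simp only [PySem.Dict.getD_counter,
      show "aeiou".toList = ['a','e','i','o','u'] from rfl]
    exact pv_sum_count ['a','e','i','o','u'] (by decide) (PySem.Str.lower s).toList
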